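-- pv_equiv track=rewrite | github.com/drahsanhussainkhan-cmd/msp-knowledge-extraction-v9 | extractors/environmental_extractor.py | _parse_condition_type
-- ===== SOURCE A (Python) =====
-- from typing import Dict, List, Optional
--
-- def _parse_condition_type(groups: Dict, language: str) -> str:
--     parameter = (groups.get('parameter') or '').lower()
--     pollutant = (groups.get('pollutant') or '').lower()
--     type_text = (groups.get('type') or '').lower()
--
--     if 'ph' in parameter:
--         return 'water_quality_ph'
--     elif any(x in parameter or x in pollutant for x in ['oxygen', 'oksijen', 'do']):
--         return 'water_quality_oxygen'
--     elif any(x in parameter or x in pollutant for x in ['salinity', 'tuzluluk']):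
--         return 'water_quality_salinity'
--     elif any(x in parameter for x in ['water quality', 'su kalitesi']):
--         return 'water_quality'
--     elif any(x in parameter or x in pollutant for x in ['nitrogen', 'nitrat', 'phosph', 'fosfat', 'eutrophication']):
--         return 'pollution_nutrients'
--     elif any(x in parameter or x in pollutant for x in ['metal', 'heavy']):
--         return 'pollution_heavy_metals'
--     elif any(x in parameter or x in pollutant for x in ['petroleum', 'petrol', 'oil', 'hydrocarbon', 'spill']):
--         return 'pollution_petroleum'
--     elif any(x in type_text or x in parameter for x in ['noise', 'gürültü', 'acoustic', 'akustik', 'underwater noise']):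
--         return 'noise'
--     elif any(x in parameter for x in ['emission', 'emisyon', 'discharge', 'deşarj']):
--         return 'emission'
--     elif any(x in parameter or x in type_text for x in ['impact', 'etki', 'eia', 'ced', 'cumulative']):
--         return 'environmental_impact'
--     elif any(x in parameter for x in ['habitat', 'biodiversity']):
--         return 'habitat_condition'
--     elif any(x in parameter for x in ['pollution', 'kirlilik']):
--         return 'pollution'
--     return 'environmental_condition'
-- ===== SOURCE B (Python) =====
-- # B: flat keyword index grouped by field, scanned with a min-priority accumulator
-- # (no ordered elif cascade, no early exit): every keyword occurrence is scored by
-- # its rule's priority and the lowest-priority hit decides the label.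
-- _LABELS = ['water_quality_ph', 'water_quality_oxygen', 'water_quality_salinity',
--            'water_quality', 'pollution_nutrients', 'pollution_heavy_metals',
--            'pollution_petroleum', 'noise', 'emission', 'environmental_impact',
--            'habitat_condition', 'pollution']
--
-- _PARAM_KWS = [('ph', 0),
--               ('oxygen', 1), ('oksijen', 1), ('do', 1),
--               ('salinity', 2), ('tuzluluk', 2),
--               ('water quality', 3), ('su kalitesi', 3),
--               ('nitrogen', 4), ('nitrat', 4), ('phosph', 4), ('fosfat', 4), ('eutrophication', 4),
--               ('metal', 5), ('heavy', 5),
--               ('petroleum', 6), ('petrol', 6), ('oil', 6), ('hydrocarbon', 6), ('spill', 6),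
--               ('noise', 7), ('gürültü', 7), ('acoustic', 7), ('akustik', 7), ('underwater noise', 7),
--               ('emission', 8), ('emisyon', 8), ('discharge', 8), ('deşarj', 8),
--               ('impact', 9), ('etki', 9), ('eia', 9), ('ced', 9), ('cumulative', 9),
--               ('habitat', 10), ('biodiversity', 10),
--               ('pollution', 11), ('kirlilik', 11)]
--
-- _POLL_KWS = [('oxygen', 1), ('oksijen', 1), ('do', 1),
--              ('salinity', 2), ('tuzluluk', 2),
--              ('nitrogen', 4), ('nitrat', 4), ('phosph', 4), ('fosfat', 4), ('eutrophication', 4),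
--              ('metal', 5), ('heavy', 5),
--              ('petroleum', 6), ('petrol', 6), ('oil', 6), ('hydrocarbon', 6), ('spill', 6)]
--
-- _TYPE_KWS = [('noise', 7), ('gürültü', 7), ('acoustic', 7), ('akustik', 7), ('underwater noise', 7),
--              ('impact', 9), ('etki', 9), ('eia', 9), ('ced', 9), ('cumulative', 9)]
--
-- def _parse_condition_type(groups, language):
--     best = None
--     for text, kws in (((groups.get('parameter') or '').lower(), _PARAM_KWS),
--                       ((groups.get('pollutant') or '').lower(), _POLL_KWS),
--                       ((groups.get('type') or '').lower(), _TYPE_KWS)):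
--         for kw, prio in kws:
--             if kw in text and (best is None or prio < best):
--                 best = prio
--     return _LABELS[best] if best is not None else 'environmental_condition'
-- ===== Notes on version B (the rewrite author's own statement) =====
-- stated objective: alternative
-- what changed: Replaces the ordered twelve-branch elif cascade (first match returns early) with a flat keyword index grouped by field, scanned once without early exit while keeping the minimum rule priority of all keyword hits; the label is looked up from the winning priority at the end.
import Mathlib
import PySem

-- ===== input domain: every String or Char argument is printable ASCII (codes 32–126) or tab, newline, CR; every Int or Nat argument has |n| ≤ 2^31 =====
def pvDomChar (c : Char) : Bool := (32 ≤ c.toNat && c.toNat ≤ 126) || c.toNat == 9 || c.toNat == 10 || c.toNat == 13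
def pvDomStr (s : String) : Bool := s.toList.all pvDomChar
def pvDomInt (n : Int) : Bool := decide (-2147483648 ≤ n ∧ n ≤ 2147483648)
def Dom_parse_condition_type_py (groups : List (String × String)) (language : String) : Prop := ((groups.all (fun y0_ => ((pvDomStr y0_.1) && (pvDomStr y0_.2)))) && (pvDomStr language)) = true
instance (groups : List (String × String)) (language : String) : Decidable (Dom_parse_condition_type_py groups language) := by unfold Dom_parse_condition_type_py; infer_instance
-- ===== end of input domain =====

-- B replaces A's twelve-branch elif cascade by a flat keyword index grouped by field,
-- scanned once with a min-priority accumulator (no early exit); labels are looked up by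
-- the winning priority (objective: alternative, same cost).


-- ===== PORT A =====
def parse_condition_type_py (groups : List (String × String)) (language : String) : String :=
  let parameter := PySem.Str.lower ((groups.lookup "parameter").getD "")
  let pollutant := PySem.Str.lower ((groups.lookup "pollutant").getD "")
  let type_text := PySem.Str.lower ((groups.lookup "type").getD "")
  if PySem.Str.isIn "ph" parameter then "water_quality_ph"
  else if ["oxygen", "oksijen", "do"].any (fun x => PySem.Str.isIn x parameter || PySem.Str.isIn x pollutant) then "water_quality_oxygen"
  else if ["salinity", "tuzluluk"].any (fun x => PySem.Str.isIn x parameter || PySem.Str.isIn x pollutant) then "water_quality_salinity"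
  else if ["water quality", "su kalitesi"].any (fun x => PySem.Str.isIn x parameter) then "water_quality"
  else if ["nitrogen", "nitrat", "phosph", "fosfat", "eutrophication"].any (fun x => PySem.Str.isIn x parameter || PySem.Str.isIn x pollutant) then "pollution_nutrients"
  else if ["metal", "heavy"].any (fun x => PySem.Str.isIn x parameter || PySem.Str.isIn x pollutant) then "pollution_heavy_metals"
  else if ["petroleum", "petrol", "oil", "hydrocarbon", "spill"].any (fun x => PySem.Str.isIn x parameter || PySem.Str.isIn x pollutant) then "pollution_petroleum"
  else if ["noise", "gürültü", "acoustic", "akustik", "underwater noise"].any (fun x => PySem.Str.isIn x type_text || PySem.Str.isIn x parameter) then "noise"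
  else if ["emission", "emisyon", "discharge", "deşarj"].any (fun x => PySem.Str.isIn x parameter) then "emission"
  else if ["impact", "etki", "eia", "ced", "cumulative"].any (fun x => PySem.Str.isIn x parameter || PySem.Str.isIn x type_text) then "environmental_impact"
  else if ["habitat", "biodiversity"].any (fun x => PySem.Str.isIn x parameter) then "habitat_condition"
  else if ["pollution", "kirlilik"].any (fun x => PySem.Str.isIn x parameter) then "pollution"
  else "environmental_condition"

-- ===== PORT B =====
-- B-side data: labels by priority, and the flat keyword index grouped by field
def pvLabels : List String :=
  ["water_quality_ph", "water_quality_oxygen", "water_quality_salinity", "water_quality",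
   "pollution_nutrients", "pollution_heavy_metals", "pollution_petroleum", "noise",
   "emission", "environmental_impact", "habitat_condition", "pollution"]

def pvParamKws : List (String × Nat) :=
  [("ph", 0),
   ("oxygen", 1), ("oksijen", 1), ("do", 1),
   ("salinity", 2), ("tuzluluk", 2),
   ("water quality", 3), ("su kalitesi", 3),
   ("nitrogen", 4), ("nitrat", 4), ("phosph", 4), ("fosfat", 4), ("eutrophication", 4),
   ("metal", 5), ("heavy", 5),
   ("petroleum", 6), ("petrol", 6), ("oil", 6), ("hydrocarbon", 6), ("spill", 6),
   ("noise", 7), ("gürültü", 7), ("acoustic", 7), ("akustik", 7), ("underwater noise", 7),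
   ("emission", 8), ("emisyon", 8), ("discharge", 8), ("deşarj", 8),
   ("impact", 9), ("etki", 9), ("eia", 9), ("ced", 9), ("cumulative", 9),
   ("habitat", 10), ("biodiversity", 10),
   ("pollution", 11), ("kirlilik", 11)]

def pvPollKws : List (String × Nat) :=
  [("oxygen", 1), ("oksijen", 1), ("do", 1),
   ("salinity", 2), ("tuzluluk", 2),
   ("nitrogen", 4), ("nitrat", 4), ("phosph", 4), ("fosfat", 4), ("eutrophication", 4),
   ("metal", 5), ("heavy", 5),
   ("petroleum", 6), ("petrol", 6), ("oil", 6), ("hydrocarbon", 6), ("spill", 6)]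

def pvTypeKws : List (String × Nat) :=
  [("noise", 7), ("gürültü", 7), ("acoustic", 7), ("akustik", 7), ("underwater noise", 7),
   ("impact", 9), ("etki", 9), ("eia", 9), ("ced", 9), ("cumulative", 9)]

-- Source B's inner for-loop: update the accumulator on every keyword hit with a lower priority
def pvScanKws (text : String) (kws : List (String × Nat)) (best : Option Nat) : Option Nat :=
  kws.foldl (fun b e =>
    if PySem.Str.isIn e.1 text && (match b with | none => true | some bp => decide (e.2 < bp))
    then some e.2 else b) best

def parse_condition_type_py_alt (groups : List (String × String)) (language : String) : String :=
  let p := PySem.Str.lower ((groups.lookup "parameter").getD "")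
  let q := PySem.Str.lower ((groups.lookup "pollutant").getD "")
  let t := PySem.Str.lower ((groups.lookup "type").getD "")
  match pvScanKws t pvTypeKws (pvScanKws q pvPollKws (pvScanKws p pvParamKws none)) with
  | some i => pvLabels.getD i "environmental_condition"   -- _LABELS[best]; the index is always 0..11
  | none => "environmental_condition"

-- ===== PRECONDITION & SPEC =====
def Spec_parse_condition_type_py (groups : List (String × String)) (language : String) (out : String) : Prop := out = parse_condition_type_py_alt groups language
instance (groups : List (String × String)) (language : String) (out : String) : Decidable (Spec_parse_condition_type_py groups language out) := by unfold Spec_parse_condition_type_py; infer_instance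

-- ===== CLAIM (what is proved, stated in full; the proofs are below) =====
def Claim_equal_parse_condition_type_py : Prop := ∀ (groups : List (String × String)) (language : String), Dom_parse_condition_type_py groups language → Spec_parse_condition_type_py groups language (parse_condition_type_py groups language)

-- ===== LEMMAS AND PROOFS =====

-- proof-side name for the full mapped entry list B folds over
def pvBig (p q t : String) : List (Bool × Nat) :=
  pvParamKws.map (fun e => (PySem.Str.isIn e.1 p, e.2)) ++
  (pvPollKws.map (fun e => (PySem.Str.isIn e.1 q, e.2)) ++
   pvTypeKws.map (fun e => (PySem.Str.isIn e.1 t, e.2)))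

-- abstract form of the scan: entries are (did the keyword hit, its priority)
def pvRun (acc : Option Nat) (L : List (Bool × Nat)) : Option Nat :=
  L.foldl (fun b e =>
    if e.1 && (match b with | none => true | some bp => decide (e.2 < bp))
    then some e.2 else b) acc

theorem pvScanKws_eq_pvRun (text : String) (kws : List (String × Nat)) (best : Option Nat) :
    pvScanKws text kws best = pvRun best (kws.map (fun e => (PySem.Str.isIn e.1 text, e.2))) := by
  simp [pvScanKws, pvRun, List.foldl_map]

theorem pvRun_append (acc : Option Nat) (L1 L2 : List (Bool × Nat)) :
    pvRun acc (L1 ++ L2) = pvRun (pvRun acc L1) L2 := by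
  simp [pvRun, List.foldl_append]

theorem pvRun_none {L : List (Bool × Nat)} (h : ∀ e ∈ L, e.1 = false) (acc : Option Nat) :
    pvRun acc L = acc := by
  induction L generalizing acc with
  | nil => rfl
  | cons e L ih =>
    have he := h e (by simp)
    simp only [pvRun, List.foldl_cons] at *
    rw [he]
    simpa using ih (fun x hx => h x (by simp [hx])) acc

theorem pvRun_keep {L : List (Bool × Nat)} {i : Nat} (h : ∀ e ∈ L, e.1 = true → i ≤ e.2) :
    pvRun (some i) L = some i := by
  induction L with
  | nil => rfl
  | cons e L ih =>
    simp only [pvRun, List.foldl_cons] at *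
    have : (if e.1 && (match some i with | none => true | some bp => decide (e.2 < bp))
            then some e.2 else some i) = some i := by
      by_cases he : e.1 = true
      · have : ¬ e.2 < i := by have := h e (by simp) he; omega
        simp [he, this]
      · simp [Bool.not_eq_true] at he
        simp [he]
    rw [this]
    exact ih (fun x hx hh => h x (by simp [hx]) hh)

theorem pvRun_min {L : List (Bool × Nat)} {i : Nat}
    (ha : ∀ e ∈ L, e.1 = true → i ≤ e.2) (hb : (true, i) ∈ L) :
    ∀ acc : Option Nat, (acc = none ∨ ∃ j, acc = some j ∧ i < j) → pvRun acc L = some i := by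
  induction L with
  | nil => simp at hb
  | cons e L ih =>
    intro acc hacc
    simp only [pvRun, List.foldl_cons]
    by_cases he : e.1 = true
    · by_cases hei : e.2 = i
      · split_ifs with hc
        · rw [hei]
          exact pvRun_keep (fun x hx hh => ha x (by simp [hx]) hh)
        · exfalso; apply hc
          rcases hacc with h1 | ⟨j, hj, hij⟩
          · subst h1; simp [he]
          · subst hj; simp [he, hei, hij]
      · have hlt : i < e.2 := by
          have := ha e (by simp) he; omega
        have hb' : (true, i) ∈ L := by
          rcases List.mem_cons.1 hb with h1 | h1
          · exfalso; apply hei; have : e = (true, i) := h1.symm; simp [this]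
          · exact h1
        split_ifs with hc
        · exact ih (fun x hx hh => ha x (by simp [hx]) hh) hb' _ (Or.inr ⟨e.2, rfl, hlt⟩)
        · exact ih (fun x hx hh => ha x (by simp [hx]) hh) hb' _ hacc
    · have he' : e.1 = false := by simpa [Bool.not_eq_true] using he
      have hb' : (true, i) ∈ L := by
        rcases List.mem_cons.1 hb with h1 | h1
        · exfalso; rw [← h1] at he'; simp at he'
        · exact h1
      split_ifs with hc
      · rw [he'] at hc; simp at hc
      · exact ih (fun x hx hh => ha x (by simp [hx]) hh) hb' _ hacc

set_option maxHeartbeats 1600000 in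
theorem pvBig_eq0 (p q t : String)  (h1 : PySem.Str.isIn "ph" p = true) :
    pvRun none (pvBig p q t) = some 0 := by
  apply pvRun_min ?_ ?_ none (Or.inl rfl)
  · simp only [pvBig, pvParamKws, pvPollKws, pvTypeKws, List.map_cons, List.map_nil, List.cons_append, List.nil_append, List.forall_mem_cons, List.not_mem_nil,
      Nat.reduceLeDiff, Bool.false_eq_true, false_implies, implies_true, and_self, and_true, true_and]
  · simp only [pvBig, pvParamKws, pvPollKws, pvTypeKws, List.map_cons, List.map_nil, List.cons_append, List.nil_append, List.mem_cons, List.not_mem_nil, Prod.mk.injEq, Bool.true_eq,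
      Nat.reduceEqDiff, and_true, and_false, and_self, false_or, or_false]
    exact h1
set_option maxHeartbeats 1600000 in
theorem pvBig_eq1 (p q t : String) (h1 : ¬ (PySem.Str.isIn "ph" p = true)) (h2 : (["oxygen", "oksijen", "do"].any fun x => PySem.Str.isIn x p || PySem.Str.isIn x q) = true) :
    pvRun none (pvBig p q t) = some 1 := by
  simp only [List.any_cons, List.any_nil, Bool.or_false, Bool.or_eq_true, not_or, Bool.not_eq_true] at h1 h2
  apply pvRun_min ?_ ?_ none (Or.inl rfl)
  · simp only [pvBig, pvParamKws, pvPollKws, pvTypeKws, List.map_cons, List.map_nil, List.cons_append, List.nil_append, List.forall_mem_cons, List.not_mem_nil, h1,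
      Nat.reduceLeDiff, Bool.false_eq_true, false_implies, implies_true, and_self, and_true, true_and]
  · simp only [pvBig, pvParamKws, pvPollKws, pvTypeKws, List.map_cons, List.map_nil, List.cons_append, List.nil_append, List.mem_cons, List.not_mem_nil, Prod.mk.injEq, Bool.true_eq,
      Nat.reduceEqDiff, and_true, and_false, and_self, false_or, or_false]
    rcases h2 with (h|h)|(h|h)|(h|h) <;> simp only [h, true_or, or_true]
set_option maxHeartbeats 1600000 in
theorem pvBig_eq2 (p q t : String) (h1 : ¬ (PySem.Str.isIn "ph" p = true)) (h2 : ¬ ((["oxygen", "oksijen", "do"].any fun x => PySem.Str.isIn x p || PySem.Str.isIn x q) = true)) (h3 : (["salinity", "tuzluluk"].any fun x => PySem.Str.isIn x p || PySem.Str.isIn x q) = true) :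
    pvRun none (pvBig p q t) = some 2 := by
  simp only [List.any_cons, List.any_nil, Bool.or_false, Bool.or_eq_true, not_or, Bool.not_eq_true] at h1 h2 h3
  apply pvRun_min ?_ ?_ none (Or.inl rfl)
  · simp only [pvBig, pvParamKws, pvPollKws, pvTypeKws, List.map_cons, List.map_nil, List.cons_append, List.nil_append, List.forall_mem_cons, List.not_mem_nil, h1, h2,
      Nat.reduceLeDiff, Bool.false_eq_true, false_implies, implies_true, and_self, and_true, true_and]
  · simp only [pvBig, pvParamKws, pvPollKws, pvTypeKws, List.map_cons, List.map_nil, List.cons_append, List.nil_append, List.mem_cons, List.not_mem_nil, Prod.mk.injEq, Bool.true_eq,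
      Nat.reduceEqDiff, and_true, and_false, and_self, false_or, or_false]
    rcases h3 with (h|h)|(h|h) <;> simp only [h, true_or, or_true]
set_option maxHeartbeats 1600000 in
theorem pvBig_eq3 (p q t : String) (h1 : ¬ (PySem.Str.isIn "ph" p = true)) (h2 : ¬ ((["oxygen", "oksijen", "do"].any fun x => PySem.Str.isIn x p || PySem.Str.isIn x q) = true)) (h3 : ¬ ((["salinity", "tuzluluk"].any fun x => PySem.Str.isIn x p || PySem.Str.isIn x q) = true)) (h4 : (["water quality", "su kalitesi"].any fun x => PySem.Str.isIn x p) = true) :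
    pvRun none (pvBig p q t) = some 3 := by
  simp only [List.any_cons, List.any_nil, Bool.or_false, Bool.or_eq_true, not_or, Bool.not_eq_true] at h1 h2 h3 h4
  apply pvRun_min ?_ ?_ none (Or.inl rfl)
  · simp only [pvBig, pvParamKws, pvPollKws, pvTypeKws, List.map_cons, List.map_nil, List.cons_append, List.nil_append, List.forall_mem_cons, List.not_mem_nil, h1, h2, h3,
      Nat.reduceLeDiff, Bool.false_eq_true, false_implies, implies_true, and_self, and_true, true_and]
  · simp only [pvBig, pvParamKws, pvPollKws, pvTypeKws, List.map_cons, List.map_nil, List.cons_append, List.nil_append, List.mem_cons, List.not_mem_nil, Prod.mk.injEq, Bool.true_eq,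
      Nat.reduceEqDiff, and_true, and_false, and_self, false_or, or_false]
    rcases h4 with h|h <;> simp only [h, true_or, or_true]
set_option maxHeartbeats 1600000 in
theorem pvBig_eq4 (p q t : String) (h1 : ¬ (PySem.Str.isIn "ph" p = true)) (h2 : ¬ ((["oxygen", "oksijen", "do"].any fun x => PySem.Str.isIn x p || PySem.Str.isIn x q) = true)) (h3 : ¬ ((["salinity", "tuzluluk"].any fun x => PySem.Str.isIn x p || PySem.Str.isIn x q) = true)) (h4 : ¬ ((["water quality", "su kalitesi"].any fun x => PySem.Str.isIn x p) = true)) (h5 : (["nitrogen", "nitrat", "phosph", "fosfat", "eutrophication"].any fun x => PySem.Str.isIn x p || PySem.Str.isIn x q) = true) :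
    pvRun none (pvBig p q t) = some 4 := by
  simp only [List.any_cons, List.any_nil, Bool.or_false, Bool.or_eq_true, not_or, Bool.not_eq_true] at h1 h2 h3 h4 h5
  apply pvRun_min ?_ ?_ none (Or.inl rfl)
  · simp only [pvBig, pvParamKws, pvPollKws, pvTypeKws, List.map_cons, List.map_nil, List.cons_append, List.nil_append, List.forall_mem_cons, List.not_mem_nil, h1, h2, h3, h4,
      Nat.reduceLeDiff, Bool.false_eq_true, false_implies, implies_true, and_self, and_true, true_and]
  · simp only [pvBig, pvParamKws, pvPollKws, pvTypeKws, List.map_cons, List.map_nil, List.cons_append, List.nil_append, List.mem_cons, List.not_mem_nil, Prod.mk.injEq, Bool.true_eq,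
      Nat.reduceEqDiff, and_true, and_false, and_self, false_or, or_false]
    rcases h5 with (h|h)|(h|h)|(h|h)|(h|h)|(h|h) <;> simp only [h, true_or, or_true]
set_option maxHeartbeats 1600000 in
theorem pvBig_eq5 (p q t : String) (h1 : ¬ (PySem.Str.isIn "ph" p = true)) (h2 : ¬ ((["oxygen", "oksijen", "do"].any fun x => PySem.Str.isIn x p || PySem.Str.isIn x q) = true)) (h3 : ¬ ((["salinity", "tuzluluk"].any fun x => PySem.Str.isIn x p || PySem.Str.isIn x q) = true)) (h4 : ¬ ((["water quality", "su kalitesi"].any fun x => PySem.Str.isIn x p) = true)) (h5 : ¬ ((["nitrogen", "nitrat", "phosph", "fosfat", "eutrophication"].any fun x => PySem.Str.isIn x p || PySem.Str.isIn x q) = true)) (h6 : (["metal", "heavy"].any fun x => PySem.Str.isIn x p || PySem.Str.isIn x q) = true) :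
    pvRun none (pvBig p q t) = some 5 := by
  simp only [List.any_cons, List.any_nil, Bool.or_false, Bool.or_eq_true, not_or, Bool.not_eq_true] at h1 h2 h3 h4 h5 h6
  apply pvRun_min ?_ ?_ none (Or.inl rfl)
  · simp only [pvBig, pvParamKws, pvPollKws, pvTypeKws, List.map_cons, List.map_nil, List.cons_append, List.nil_append, List.forall_mem_cons, List.not_mem_nil, h1, h2, h3, h4, h5,
      Nat.reduceLeDiff, Bool.false_eq_true, false_implies, implies_true, and_self, and_true, true_and]
  · simp only [pvBig, pvParamKws, pvPollKws, pvTypeKws, List.map_cons, List.map_nil, List.cons_append, List.nil_append, List.mem_cons, List.not_mem_nil, Prod.mk.injEq, Bool.true_eq,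
      Nat.reduceEqDiff, and_true, and_false, and_self, false_or, or_false]
    rcases h6 with (h|h)|(h|h) <;> simp only [h, true_or, or_true]
set_option maxHeartbeats 1600000 in
theorem pvBig_eq6 (p q t : String) (h1 : ¬ (PySem.Str.isIn "ph" p = true)) (h2 : ¬ ((["oxygen", "oksijen", "do"].any fun x => PySem.Str.isIn x p || PySem.Str.isIn x q) = true)) (h3 : ¬ ((["salinity", "tuzluluk"].any fun x => PySem.Str.isIn x p || PySem.Str.isIn x q) = true)) (h4 : ¬ ((["water quality", "su kalitesi"].any fun x => PySem.Str.isIn x p) = true)) (h5 : ¬ ((["nitrogen", "nitrat", "phosph", "fosfat", "eutrophication"].any fun x => PySem.Str.isIn x p || PySem.Str.isIn x q) = true)) (h6 : ¬ ((["metal", "heavy"].any fun x => PySem.Str.isIn x p || PySem.Str.isIn x q) = true)) (h7 : (["petroleum", "petrol", "oil", "hydrocarbon", "spill"].any fun x => PySem.Str.isIn x p || PySem.Str.isIn x q) = true) :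
    pvRun none (pvBig p q t) = some 6 := by
  simp only [List.any_cons, List.any_nil, Bool.or_false, Bool.or_eq_true, not_or, Bool.not_eq_true] at h1 h2 h3 h4 h5 h6 h7
  apply pvRun_min ?_ ?_ none (Or.inl rfl)
  · simp only [pvBig, pvParamKws, pvPollKws, pvTypeKws, List.map_cons, List.map_nil, List.cons_append, List.nil_append, List.forall_mem_cons, List.not_mem_nil, h1, h2, h3, h4, h5, h6,
      Nat.reduceLeDiff, Bool.false_eq_true, false_implies, implies_true, and_self, and_true, true_and]
  · simp only [pvBig, pvParamKws, pvPollKws, pvTypeKws, List.map_cons, List.map_nil, List.cons_append, List.nil_append, List.mem_cons, List.not_mem_nil, Prod.mk.injEq, Bool.true_eq,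
      Nat.reduceEqDiff, and_true, and_false, and_self, false_or, or_false]
    rcases h7 with (h|h)|(h|h)|(h|h)|(h|h)|(h|h) <;> simp only [h, true_or, or_true]
set_option maxHeartbeats 1600000 in
theorem pvBig_eq7 (p q t : String) (h1 : ¬ (PySem.Str.isIn "ph" p = true)) (h2 : ¬ ((["oxygen", "oksijen", "do"].any fun x => PySem.Str.isIn x p || PySem.Str.isIn x q) = true)) (h3 : ¬ ((["salinity", "tuzluluk"].any fun x => PySem.Str.isIn x p || PySem.Str.isIn x q) = true)) (h4 : ¬ ((["water quality", "su kalitesi"].any fun x => PySem.Str.isIn x p) = true)) (h5 : ¬ ((["nitrogen", "nitrat", "phosph", "fosfat", "eutrophication"].any fun x => PySem.Str.isIn x p || PySem.Str.isIn x q) = true)) (h6 : ¬ ((["metal", "heavy"].any fun x => PySem.Str.isIn x p || PySem.Str.isIn x q) = true)) (h7 : ¬ ((["petroleum", "petrol", "oil", "hydrocarbon", "spill"].any fun x => PySem.Str.isIn x p || PySem.Str.isIn x q) = true)) (h8 : (["noise", "gürültü", "acoustic", "akustik", "underwater noise"].any fun x => PySem.Str.isIn x t || PySem.Str.isIn x p)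 = true) :
    pvRun none (pvBig p q t) = some 7 := by
  simp only [List.any_cons, List.any_nil, Bool.or_false, Bool.or_eq_true, not_or, Bool.not_eq_true] at h1 h2 h3 h4 h5 h6 h7 h8
  apply pvRun_min ?_ ?_ none (Or.inl rfl)
  · simp only [pvBig, pvParamKws, pvPollKws, pvTypeKws, List.map_cons, List.map_nil, List.cons_append, List.nil_append, List.forall_mem_cons, List.not_mem_nil, h1, h2, h3, h4, h5, h6, h7,
      Nat.reduceLeDiff, Bool.false_eq_true, false_implies, implies_true, and_self, and_true, true_and]
  · simp only [pvBig, pvParamKws, pvPollKws, pvTypeKws, List.map_cons, List.map_nil, List.cons_append, List.nil_append, List.mem_cons, List.not_mem_nil, Prod.mk.injEq, Bool.true_eq,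
      Nat.reduceEqDiff, and_true, and_false, and_self, false_or, or_false]
    rcases h8 with (h|h)|(h|h)|(h|h)|(h|h)|(h|h) <;> simp only [h, true_or, or_true]
set_option maxHeartbeats 1600000 in
theorem pvBig_eq8 (p q t : String) (h1 : ¬ (PySem.Str.isIn "ph" p = true)) (h2 : ¬ ((["oxygen", "oksijen", "do"].any fun x => PySem.Str.isIn x p || PySem.Str.isIn x q) = true)) (h3 : ¬ ((["salinity", "tuzluluk"].any fun x => PySem.Str.isIn x p || PySem.Str.isIn x q) = true)) (h4 : ¬ ((["water quality", "su kalitesi"].any fun x => PySem.Str.isIn x p) = true)) (h5 : ¬ ((["nitrogen", "nitrat", "phosph", "fosfat", "eutrophication"].any fun x => PySem.Str.isIn x p || PySem.Str.isIn x q) = true)) (h6 : ¬ ((["metal", "heavy"].any fun x => PySem.Str.isIn x p || PySem.Str.isIn x q) = true)) (h7 : ¬ ((["petroleum", "petrol", "oil", "hydrocarbon", "spill"].any fun x => PySem.Str.isIn x p || PySem.Str.isIn x q) = true)) (h8 : ¬ ((["noise", "gürültü", "acoustic", "akustik", "underwater noise"].any fun x => PySem.Str.isIn x t || PySem.Str.isIn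 x p) = true)) (h9 : (["emission", "emisyon", "discharge", "deşarj"].any fun x => PySem.Str.isIn x p) = true) :
    pvRun none (pvBig p q t) = some 8 := by
  simp only [List.any_cons, List.any_nil, Bool.or_false, Bool.or_eq_true, not_or, Bool.not_eq_true] at h1 h2 h3 h4 h5 h6 h7 h8 h9
  apply pvRun_min ?_ ?_ none (Or.inl rfl)
  · simp only [pvBig, pvParamKws, pvPollKws, pvTypeKws, List.map_cons, List.map_nil, List.cons_append, List.nil_append, List.forall_mem_cons, List.not_mem_nil, h1, h2, h3, h4, h5, h6, h7, h8,
      Nat.reduceLeDiff, Bool.false_eq_true, false_implies, implies_true, and_self, and_true, true_and]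
  · simp only [pvBig, pvParamKws, pvPollKws, pvTypeKws, List.map_cons, List.map_nil, List.cons_append, List.nil_append, List.mem_cons, List.not_mem_nil, Prod.mk.injEq, Bool.true_eq,
      Nat.reduceEqDiff, and_true, and_false, and_self, false_or, or_false]
    rcases h9 with h|h|h|h <;> simp only [h, true_or, or_true]
set_option maxHeartbeats 1600000 in
theorem pvBig_eq9 (p q t : String) (h1 : ¬ (PySem.Str.isIn "ph" p = true)) (h2 : ¬ ((["oxygen", "oksijen", "do"].any fun x => PySem.Str.isIn x p || PySem.Str.isIn x q) = true)) (h3 : ¬ ((["salinity", "tuzluluk"].any fun x => PySem.Str.isIn x p || PySem.Str.isIn x q) = true)) (h4 : ¬ ((["water quality", "su kalitesi"].any fun x => PySem.Str.isIn x p) = true)) (h5 : ¬ ((["nitrogen", "nitrat", "phosph", "fosfat", "eutrophication"].any fun x => PySem.Str.isIn x p || PySem.Str.isIn x q) = true)) (h6 : ¬ ((["metal", "heavy"].any fun x => PySem.Str.isIn x p || PySem.Str.isIn x q) = true)) (h7 : ¬ ((["petroleum", "petrol", "oil", "hydrocarbon", "spill"].any fun x => PySem.Str.isIn x p || PySem.Str.isIn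 x q) = true)) (h8 : ¬ ((["noise", "gürültü", "acoustic", "akustik", "underwater noise"].any fun x => PySem.Str.isIn x t || PySem.Str.isIn x p) = true)) (h9 : ¬ ((["emission", "emisyon", "discharge", "deşarj"].any fun x => PySem.Str.isIn x p) = true)) (h10 : (["impact", "etki", "eia", "ced", "cumulative"].any fun x => PySem.Str.isIn x p || PySem.Str.isIn x t) = true) :
    pvRun none (pvBig p q t) = some 9 := by
  simp only [List.any_cons, List.any_nil, Bool.or_false, Bool.or_eq_true, not_or, Bool.not_eq_true] at h1 h2 h3 h4 h5 h6 h7 h8 h9 h10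
  apply pvRun_min ?_ ?_ none (Or.inl rfl)
  · simp only [pvBig, pvParamKws, pvPollKws, pvTypeKws, List.map_cons, List.map_nil, List.cons_append, List.nil_append, List.forall_mem_cons, List.not_mem_nil, h1, h2, h3, h4, h5, h6, h7, h8, h9,
      Nat.reduceLeDiff, Bool.false_eq_true, false_implies, implies_true, and_self, and_true, true_and]
  · simp only [pvBig, pvParamKws, pvPollKws, pvTypeKws, List.map_cons, List.map_nil, List.cons_append, List.nil_append, List.mem_cons, List.not_mem_nil, Prod.mk.injEq, Bool.true_eq,
      Nat.reduceEqDiff, and_true, and_false, and_self, false_or, or_false]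
    rcases h10 with (h|h)|(h|h)|(h|h)|(h|h)|(h|h) <;> simp only [h, true_or, or_true]
set_option maxHeartbeats 1600000 in
theorem pvBig_eq10 (p q t : String) (h1 : ¬ (PySem.Str.isIn "ph" p = true)) (h2 : ¬ ((["oxygen", "oksijen", "do"].any fun x => PySem.Str.isIn x p || PySem.Str.isIn x q) = true)) (h3 : ¬ ((["salinity", "tuzluluk"].any fun x => PySem.Str.isIn x p || PySem.Str.isIn x q) = true)) (h4 : ¬ ((["water quality", "su kalitesi"].any fun x => PySem.Str.isIn x p) = true)) (h5 : ¬ ((["nitrogen", "nitrat", "phosph", "fosfat", "eutrophication"].any fun x => PySem.Str.isIn x p || PySem.Str.isIn x q) = true)) (h6 : ¬ ((["metal", "heavy"].any fun x => PySem.Str.isIn x p || PySem.Str.isIn x q) = true)) (h7 : ¬ ((["petroleum", "petrol", "oil", "hydrocarbon", "spill"].any fun x => PySem.Str.isIn x p || PySem.Str.isIn x q) = true)) (h8 : ¬ ((["noise", "gürültü", "acoustic", "akustik", "underwater noise"].any fun x => PySem.Str.isIn x t || PySem.Str.isIn x p) = true)) (h9 : ¬ ((["emission", "emisyon", "discharge",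 "deşarj"].any fun x => PySem.Str.isIn x p) = true)) (h10 : ¬ ((["impact", "etki", "eia", "ced", "cumulative"].any fun x => PySem.Str.isIn x p || PySem.Str.isIn x t) = true)) (h11 : (["habitat", "biodiversity"].any fun x => PySem.Str.isIn x p) = true) :
    pvRun none (pvBig p q t) = some 10 := by
  simp only [List.any_cons, List.any_nil, Bool.or_false, Bool.or_eq_true, not_or, Bool.not_eq_true] at h1 h2 h3 h4 h5 h6 h7 h8 h9 h10 h11
  apply pvRun_min ?_ ?_ none (Or.inl rfl)
  · simp only [pvBig, pvParamKws, pvPollKws, pvTypeKws, List.map_cons, List.map_nil, List.cons_append, List.nil_append, List.forall_mem_cons, List.not_mem_nil, h1, h2, h3, h4, h5, h6, h7, h8, h9, h10,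
      Nat.reduceLeDiff, Bool.false_eq_true, false_implies, implies_true, and_self, and_true, true_and]
  · simp only [pvBig, pvParamKws, pvPollKws, pvTypeKws, List.map_cons, List.map_nil, List.cons_append, List.nil_append, List.mem_cons, List.not_mem_nil, Prod.mk.injEq, Bool.true_eq,
      Nat.reduceEqDiff, and_true, and_false, and_self, false_or, or_false]
    rcases h11 with h|h <;> simp only [h, true_or, or_true]
set_option maxHeartbeats 1600000 in
theorem pvBig_eq11 (p q t : String) (h1 : ¬ (PySem.Str.isIn "ph" p = true)) (h2 : ¬ ((["oxygen", "oksijen", "do"].any fun x => PySem.Str.isIn x p || PySem.Str.isIn x q) = true)) (h3 : ¬ ((["salinity", "tuzluluk"].any fun x => PySem.Str.isIn x p || PySem.Str.isIn x q) = true)) (h4 : ¬ ((["water quality", "su kalitesi"].any fun x => PySem.Str.isIn x p) = true)) (h5 : ¬ ((["nitrogen", "nitrat", "phosph", "fosfat", "eutrophication"].any fun x => PySem.Str.isIn x p || PySem.Str.isIn x q) = true)) (h6 : ¬ ((["metal", "heavy"].any fun x => PySem.Str.isIn x p || PySem.Str.isIn x q) = true)) (h7 : ¬ ((["petroleum", "petrol",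 "oil", "hydrocarbon", "spill"].any fun x => PySem.Str.isIn x p || PySem.Str.isIn x q) = true)) (h8 : ¬ ((["noise", "gürültü", "acoustic", "akustik", "underwater noise"].any fun x => PySem.Str.isIn x t || PySem.Str.isIn x p) = true)) (h9 : ¬ ((["emission", "emisyon", "discharge", "deşarj"].any fun x => PySem.Str.isIn x p) = true)) (h10 : ¬ ((["impact", "etki", "eia", "ced", "cumulative"].any fun x => PySem.Str.isIn x p || PySem.Str.isIn x t) = true)) (h11 : ¬ ((["habitat", "biodiversity"].any fun x => PySem.Str.isIn x p) = true)) (h12 : (["pollution", "kirlilik"].any fun x => PySem.Str.isIn x p) = true) :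
    pvRun none (pvBig p q t) = some 11 := by
  simp only [List.any_cons, List.any_nil, Bool.or_false, Bool.or_eq_true, not_or, Bool.not_eq_true] at h1 h2 h3 h4 h5 h6 h7 h8 h9 h10 h11 h12
  apply pvRun_min ?_ ?_ none (Or.inl rfl)
  · simp only [pvBig, pvParamKws, pvPollKws, pvTypeKws, List.map_cons, List.map_nil, List.cons_append, List.nil_append, List.forall_mem_cons, List.not_mem_nil, h1, h2, h3, h4, h5, h6, h7, h8, h9, h10, h11,
      Nat.reduceLeDiff, Bool.false_eq_true, false_implies, implies_true, and_self, and_true, true_and]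
  · simp only [pvBig, pvParamKws, pvPollKws, pvTypeKws, List.map_cons, List.map_nil, List.cons_append, List.nil_append, List.mem_cons, List.not_mem_nil, Prod.mk.injEq, Bool.true_eq,
      Nat.reduceEqDiff, and_true, and_false, and_self, false_or, or_false]
    rcases h12 with h|h <;> simp only [h, true_or, or_true]
set_option maxHeartbeats 1600000 in
theorem pvBig_eqNone (p q t : String) (h1 : ¬ (PySem.Str.isIn "ph" p = true)) (h2 : ¬ ((["oxygen", "oksijen", "do"].any fun x => PySem.Str.isIn x p || PySem.Str.isIn x q) = true)) (h3 : ¬ ((["salinity", "tuzluluk"].any fun x => PySem.Str.isIn x p || PySem.Str.isIn x q) = true)) (h4 : ¬ ((["water quality", "su kalitesi"].any fun x => PySem.Str.isIn x p) = true)) (h5 : ¬ ((["nitrogen", "nitrat", "phosph", "fosfat", "eutrophication"].any fun x => PySem.Str.isIn x p || PySem.Str.isIn x q) = true)) (h6 : ¬ ((["metal", "heavy"].any fun x => PySem.Str.isIn x p || PySem.Str.isIn x q) = true)) (h7 : ¬ ((["petroleum", "petrol", "oil", "hydrocarbon", "spill"].any fun x => PySem.Str.isIn x p || PySem.Str.isIn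 x q) = true)) (h8 : ¬ ((["noise", "gürültü", "acoustic", "akustik", "underwater noise"].any fun x => PySem.Str.isIn x t || PySem.Str.isIn x p) = true)) (h9 : ¬ ((["emission", "emisyon", "discharge", "deşarj"].any fun x => PySem.Str.isIn x p) = true)) (h10 : ¬ ((["impact", "etki", "eia", "ced", "cumulative"].any fun x => PySem.Str.isIn x p || PySem.Str.isIn x t) = true)) (h11 : ¬ ((["habitat", "biodiversity"].any fun x => PySem.Str.isIn x p) = true)) (h12 : ¬ ((["pollution", "kirlilik"].any fun x => PySem.Str.isIn x p) = true)) :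
    pvRun none (pvBig p q t) = none := by
  simp only [List.any_cons, List.any_nil, Bool.or_false, Bool.or_eq_true, not_or, Bool.not_eq_true] at h1 h2 h3 h4 h5 h6 h7 h8 h9 h10 h11 h12
  apply pvRun_none
  simp only [pvBig, pvParamKws, pvPollKws, pvTypeKws, List.map_cons, List.map_nil, List.cons_append, List.nil_append, List.forall_mem_cons, List.not_mem_nil, h1, h2, h3, h4, h5, h6, h7, h8, h9, h10, h11, h12,
    false_implies, implies_true, and_self, and_true, true_and]
theorem pvAlt_big (p q t : String) :
    (match pvScanKws t pvTypeKws (pvScanKws q pvPollKws (pvScanKws p pvParamKws none)) with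
     | some i => pvLabels.getD i "environmental_condition"
     | none => "environmental_condition")
    = (match pvRun none (pvBig p q t) with
       | some i => pvLabels.getD i "environmental_condition"
       | none => "environmental_condition") := by
  rw [pvScanKws_eq_pvRun p, pvScanKws_eq_pvRun q, pvScanKws_eq_pvRun t,
      ← pvRun_append, ← pvRun_append]
  rfl

-- ===== VERDICT (by name: the statement is the Claim_ definition above) =====
set_option maxHeartbeats 1600000 in
theorem parse_condition_type_py_spec : Claim_equal_parse_condition_type_py := by
  intro groups language _
  unfold Spec_parse_condition_type_py parse_condition_type_py parse_condition_type_py_alt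
  generalize PySem.Str.lower ((List.lookup "parameter" groups).getD "") = p
  generalize PySem.Str.lower ((List.lookup "pollutant" groups).getD "") = q
  generalize PySem.Str.lower ((List.lookup "type" groups).getD "") = t
  dsimp only
  rw [pvAlt_big p q t]
  by_cases h1 : PySem.Str.isIn "ph" p = true
  · rw [if_pos h1, pvBig_eq0 p q t h1]
    rfl
  · rw [if_neg h1]
    by_cases h2 : (["oxygen", "oksijen", "do"].any fun x => PySem.Str.isIn x p || PySem.Str.isIn x q) = true
    · rw [if_pos h2, pvBig_eq1 p q t h1 h2]
      rfl
    · rw [if_neg h2]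
      by_cases h3 : (["salinity", "tuzluluk"].any fun x => PySem.Str.isIn x p || PySem.Str.isIn x q) = true
      · rw [if_pos h3, pvBig_eq2 p q t h1 h2 h3]
        rfl
      · rw [if_neg h3]
        by_cases h4 : (["water quality", "su kalitesi"].any fun x => PySem.Str.isIn x p) = true
        · rw [if_pos h4, pvBig_eq3 p q t h1 h2 h3 h4]
          rfl
        · rw [if_neg h4]
          by_cases h5 : (["nitrogen", "nitrat", "phosph", "fosfat", "eutrophication"].any fun x => PySem.Str.isIn x p || PySem.Str.isIn x q) = true
          · rw [if_pos h5, pvBig_eq4 p q t h1 h2 h3 h4 h5]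
            rfl
          · rw [if_neg h5]
            by_cases h6 : (["metal", "heavy"].any fun x => PySem.Str.isIn x p || PySem.Str.isIn x q) = true
            · rw [if_pos h6, pvBig_eq5 p q t h1 h2 h3 h4 h5 h6]
              rfl
            · rw [if_neg h6]
              by_cases h7 : (["petroleum", "petrol", "oil", "hydrocarbon", "spill"].any fun x => PySem.Str.isIn x p || PySem.Str.isIn x q) = true
              · rw [if_pos h7, pvBig_eq6 p q t h1 h2 h3 h4 h5 h6 h7]
                rfl
              · rw [if_neg h7]
                by_cases h8 : (["noise", "gürültü", "acoustic", "akustik", "underwater noise"].any fun x => PySem.Str.isIn x t || PySem.Str.isIn x p) = true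
                · rw [if_pos h8, pvBig_eq7 p q t h1 h2 h3 h4 h5 h6 h7 h8]
                  rfl
                · rw [if_neg h8]
                  by_cases h9 : (["emission", "emisyon", "discharge", "deşarj"].any fun x => PySem.Str.isIn x p) = true
                  · rw [if_pos h9, pvBig_eq8 p q t h1 h2 h3 h4 h5 h6 h7 h8 h9]
                    rfl
                  · rw [if_neg h9]
                    by_cases h10 : (["impact", "etki", "eia", "ced", "cumulative"].any fun x => PySem.Str.isIn x p || PySem.Str.isIn x t) = true
                    · rw [if_pos h10, pvBig_eq9 p q t h1 h2 h3 h4 h5 h6 h7 h8 h9 h10]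
                      rfl
                    · rw [if_neg h10]
                      by_cases h11 : (["habitat", "biodiversity"].any fun x => PySem.Str.isIn x p) = true
                      · rw [if_pos h11, pvBig_eq10 p q t h1 h2 h3 h4 h5 h6 h7 h8 h9 h10 h11]
                        rfl
                      · rw [if_neg h11]
                        by_cases h12 : (["pollution", "kirlilik"].any fun x => PySem.Str.isIn x p) = true
                        · rw [if_pos h12, pvBig_eq11 p q t h1 h2 h3 h4 h5 h6 h7 h8 h9 h10 h11 h12]
                          rfl
                        · rw [if_neg h12]
                          rw [pvBig_eqNone p q t h1 h2 h3 h4 h5 h6 h7 h8 h9 h10 h11 h12]
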